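-- pv_equiv track=rewrite | github.com/SanjuEpic/Python-DSA | Longest_Substr(distinct characters)Using sets.py | LongSubstr
-- ===== SOURCE A (Python) =====
-- def LongSubstr(st):
--     if len(st)==0:
--         return 0
--     max_lst=[]
--     s=set()
--     # s={} this notation creates an empty dictionary
--     # Be cautious of sets and dict
--     for char in st:
--         s.add(char)
--     for i in  range(0,len(st)-len(s)):
--         x=set()
--         x.update(st[i:i+len(s)])
--         max_lst.append(len(x))
--     return max(max_lst)
-- ===== SOURCE B (Python) =====
-- def LongSubstr(st):
--     n = len(st)
--     if n == 0:
--         return 0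
--     k = len(set(st))
--     freq = {}
--     distinct = 0
--     best = 0
--     for j, ch in enumerate(st):
--         c = freq.get(ch, 0)
--         freq[ch] = c + 1
--         if c == 0:
--             distinct += 1
--         if j >= k:
--             out = st[j - k]
--             c2 = freq[out]
--             freq[out] = c2 - 1
--             if c2 == 1:
--                 distinct -= 1
--         if j >= k - 1 and distinct > best:
--             best = distinct
--     return best
-- ===== Notes on version B (the rewrite author's own statement) =====
-- stated objective: faster
-- what changed: Replaced the per-window set rebuild (a fresh set over each length-k slice) by a single sliding-window pass that maintains a character-frequency dict and an incremental distinct count.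
-- intended difference: On nonempty strings with a repeated character whose final length-k window (k = number of distinct characters) has strictly more distinct characters than every earlier window, A's range(0, n-k) skips that last full window and returns the smaller earlier maximum, while B includes it and returns its distinct count, the intended maximum over all full windows. — e.g. on LongSubstr("aab"): A returns 1, B returns 2
import Mathlib
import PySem

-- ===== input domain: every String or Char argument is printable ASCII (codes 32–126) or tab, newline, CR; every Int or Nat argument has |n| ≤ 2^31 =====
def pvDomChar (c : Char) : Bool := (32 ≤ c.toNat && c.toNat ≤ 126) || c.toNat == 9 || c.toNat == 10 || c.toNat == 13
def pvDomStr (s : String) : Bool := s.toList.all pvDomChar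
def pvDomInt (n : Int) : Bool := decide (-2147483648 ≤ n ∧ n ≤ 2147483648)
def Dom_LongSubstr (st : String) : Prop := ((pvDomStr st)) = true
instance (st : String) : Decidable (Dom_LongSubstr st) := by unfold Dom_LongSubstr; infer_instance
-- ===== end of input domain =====

-- B replaces A's per-window set rebuild by one sliding-window pass with a char-frequency dict
-- and an incremental distinct count (objective: faster, asymptotic). A also skips the last
-- full window (range(0, n-k)); B includes it — see D_LongSubstr below.

-- ===== PORT A =====
def LongSubstr (st : String) : Int :=
  let l := st.toList
  if l.length == 0 then 0
  else
    -- s = set(); for char in st: s.add(char)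
    let s : PySem.Set Char := l.foldl (fun s c => PySem.Set.add s c) PySem.Set.empty
    -- for i in range(0, len(st)-len(s)): x = set(); x.update(st[i:i+len(s)]); max_lst.append(len(x))
    let maxLst : List Int :=
      (PySem.List.pyRange 0 ((l.length : Int) - (s.length : Int)) 1).foldl
        (fun acc i =>
          let x : PySem.Set Char :=
            PySem.Set.update PySem.Set.empty (PySem.List.slice l (some i) (some (i + (s.length : Int))))
          acc ++ [((x.length : Int))]) []
    -- max(max_lst); Python raises ValueError on an empty list — excluded by Pre_LongSubstr
    (PySem.List.max? maxLst (fun y => y)).getD 0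

-- ===== PORT B =====
-- loop body of Source B (one step of the sliding window; `freq[out]` is ported with getD,
-- exact because `out` is a character of the current window, hence a present key)
def pvBStep (l : List Char) (k : Int) (acc : PySem.Dict Char Int × Int × Int) (jc : Int × Char) :
    PySem.Dict Char Int × Int × Int :=
  let freq := acc.1
  let distinct := acc.2.1
  let best := acc.2.2
  let j := jc.1
  let ch := jc.2
  let c := freq.getD ch 0
  let freq := freq.insert ch (c + 1)
  let distinct := if c == 0 then distinct + 1 else distinct
  let fd : PySem.Dict Char Int × Int :=
    if j ≥ k then
      let out := (PySem.List.pyGet? l (j - k)).getD ' '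
      let c2 := freq.getD out 0
      (freq.insert out (c2 - 1), if c2 == 1 then distinct - 1 else distinct)
    else (freq, distinct)
  let best := if j ≥ k - 1 ∧ fd.2 > best then fd.2 else best
  (fd.1, fd.2, best)

def LongSubstr_alt (st : String) : Int :=
  let l := st.toList
  let n := l.length
  if n == 0 then 0
  else
    let k : Int := ((PySem.Set.ofList l).length : Int)
    let r := (PySem.List.enumerate l 0).foldl (pvBStep l k) (PySem.Dict.empty, 0, 0)
    r.2.2

-- ===== PRECONDITION & SPEC =====
-- Pre_ excludes exactly the nonempty strings whose characters are all distinct: there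
-- range(0, n-k) is empty and A's max([]) raises ValueError.
def Pre_LongSubstr (st : String) : Prop := st.toList = [] ∨ ¬ st.toList.Nodup
instance (st : String) : Decidable (Pre_LongSubstr st) := by unfold Pre_LongSubstr; infer_instance
def pvWitness_LongSubstr : String := "aab"

-- number of distinct characters of the length-k window of l starting at i (used by D_)
def pvW (l : List Char) (k i : Nat) : Nat := ((l.drop i).take k).toFinset.card

-- On nonempty strings with a repeated character whose final length-k window (k = number of
-- distinct characters) has strictly more distinct characters than every earlier window,
-- A's range(0, n-k) skips that last full window and returns the smaller earlier maximum,
-- while B includes it and returns its distinct count, the intended maximum over all full windows.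
def D_LongSubstr (st : String) : Prop :=
  st.toList ≠ [] ∧ ¬ st.toList.Nodup ∧
    ∀ i < st.toList.length - (PySem.List.dedup st.toList).length,
      pvW st.toList (PySem.List.dedup st.toList).length i <
        pvW st.toList (PySem.List.dedup st.toList).length
          (st.toList.length - (PySem.List.dedup st.toList).length)
instance (st : String) : Decidable (D_LongSubstr st) := by unfold D_LongSubstr; infer_instance

def Spec_LongSubstr (st : String) (out : Int) : Prop := ¬ D_LongSubstr st → out = LongSubstr_alt st
instance (st : String) (out : Int) : Decidable (Spec_LongSubstr st out) := by unfold Spec_LongSubstr; infer_instance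

def pvDiffWitness_LongSubstr : String := "aab"
def pvDiffWitnessOut_LongSubstr : Int × Int := (1, 2)

-- ===== CLAIM (what is proved, stated in full; the proofs are below) =====
def Claim_unchanged_LongSubstr : Prop :=
  ∀ (st : String), Dom_LongSubstr st → Pre_LongSubstr st → Spec_LongSubstr st (LongSubstr st)
def Claim_changed_LongSubstr : Prop :=
  Dom_LongSubstr (pvDiffWitness_LongSubstr) ∧ Pre_LongSubstr (pvDiffWitness_LongSubstr) ∧
    D_LongSubstr (pvDiffWitness_LongSubstr) ∧
    LongSubstr (pvDiffWitness_LongSubstr) = pvDiffWitnessOut_LongSubstr.1 ∧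
    LongSubstr_alt (pvDiffWitness_LongSubstr) = pvDiffWitnessOut_LongSubstr.2 ∧
    pvDiffWitnessOut_LongSubstr.1 ≠ pvDiffWitnessOut_LongSubstr.2
def Claim_exact_LongSubstr : Prop :=
  ∀ (st : String), Dom_LongSubstr st → Pre_LongSubstr st → D_LongSubstr st →
    LongSubstr st ≠ LongSubstr_alt st

-- ===== LEMMAS AND PROOFS =====

def pvWindow (l : List Char) (k p : Nat) : List Char := (l.drop (p - k)).take (min p k)

def pvBest (l : List Char) (k p : Nat) : Int :=
  ((List.range (p + 1 - k)).map (fun i => (pvW l k i : Int))).foldl max 0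

def pvState (l : List Char) (p : Nat) : PySem.Dict Char Int × Int × Int :=
  ((PySem.List.enumerate l 0).take p).foldl
    (pvBStep l ((PySem.List.dedup l).length : Int)) (PySem.Dict.empty, 0, 0)

lemma pvState_succ (l : List Char) (p : Nat) (hp : p < l.length) :
    pvState l (p + 1)
      = pvBStep l ((PySem.List.dedup l).length : Int) (pvState l p) ((p : Int), l[p]) := by
  unfold pvState
  rw [List.take_add_one, List.foldl_append]
  have h : (PySem.List.enumerate l 0)[p]? = some ((p : Int), l[p]) := by
    rw [PySem.List.getElem?_enumerate, List.getElem?_eq_getElem hp]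
    simp
  rw [h]
  rfl

lemma pvCount_insert (freq : PySem.Dict Char Int) (xs : List Char) (ch : Char)
    (h : ∀ c, freq.getD c 0 = (xs.count c : Int)) :
    ∀ c, (freq.insert ch (freq.getD ch 0 + 1)).getD c 0 = ((xs ++ [ch]).count c : Int) := by
  intro c
  rw [PySem.Dict.getD_insert]
  by_cases hc : c = ch
  · subst hc; simp [h c, List.count_append]
  · simp [hc, h c, List.count_append, Ne.symm hc]

lemma pvCard_append (xs : List Char) (ch : Char) :
    (((xs ++ [ch]).toFinset.card : Int))
      = if xs.count ch = 0 then (xs.toFinset.card : Int) + 1 else (xs.toFinset.card : Int) := by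
  have : (xs ++ [ch]).toFinset = insert ch xs.toFinset := by
    ext c; simp
  rw [this]
  by_cases hm : ch ∈ xs
  · rw [if_neg (by simp [List.count_eq_zero, hm]), Finset.insert_eq_self.mpr (by simpa using hm)]
  · rw [if_pos (by simp [List.count_eq_zero, hm]),
      Finset.card_insert_of_notMem (by simpa using hm)]
    push_cast; ring

lemma pvCard_cons (out : Char) (ys : List Char) :
    ((ys.toFinset.card : Int))
      = if ((out :: ys).count out : Int) = 1 then ((out :: ys).toFinset.card : Int) - 1
        else ((out :: ys).toFinset.card : Int) := by
  have htc : (out :: ys).count out = ys.count out + 1 := by simp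
  have hins : (out :: ys).toFinset = insert out ys.toFinset := by simp
  by_cases hm : out ∈ ys
  · rw [if_neg (by push_cast [htc]; have := List.count_pos_iff.mpr hm; omega)]
    rw [hins, Finset.insert_eq_self.mpr (by simpa using hm)]
  · rw [if_pos (by push_cast [htc]; simp [List.count_eq_zero.mpr hm])]
    rw [hins, Finset.card_insert_of_notMem (by simpa using hm)]
    push_cast; ring

lemma pvWin_lt (l : List Char) (k p : Nat) (hpk : p ≤ k) : pvWindow l k p = l.take p := by
  unfold pvWindow
  rw [Nat.sub_eq_zero_of_le hpk, Nat.min_eq_left hpk, List.drop_zero]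

lemma pvWin_ge (l : List Char) (k p : Nat) (hpk : k ≤ p) :
    pvWindow l k p = (l.drop (p - k)).take k := by
  unfold pvWindow; rw [Nat.min_eq_right hpk]

lemma pvWin_cons (l : List Char) (k p : Nat) (hk : 1 ≤ k) (hpk : k ≤ p) (hpn : p < l.length) :
    pvWindow l k p = l[p - k]'(by omega) :: (l.drop (p - k + 1)).take (k - 1) := by
  obtain ⟨k', rfl⟩ : ∃ k', k = k' + 1 := ⟨k - 1, by omega⟩
  rw [pvWin_ge l (k' + 1) p hpk]
  rw [List.drop_eq_getElem_cons (by omega), List.take_succ_cons]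
  simp

lemma pvWin_snoc (l : List Char) (k p : Nat) (hk : 1 ≤ k) (hpk : k ≤ p) (hpn : p < l.length) :
    pvWindow l k (p + 1)
      = (l.drop (p - k + 1)).take (k - 1) ++ [l[p]'(hpn)] := by
  obtain ⟨k', rfl⟩ : ∃ k', k = k' + 1 := ⟨k - 1, by omega⟩
  rw [pvWin_ge l (k' + 1) (p+1) (by omega), show p + 1 - (k' + 1) = p - (k' + 1) + 1 by omega]
  rw [List.take_add_one]
  congr 1
  rw [List.getElem?_drop, show p - (k' + 1) + 1 + k' = p by omega,
    List.getElem?_eq_getElem hpn]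
  rfl

lemma pvBest_succ_lt (l : List Char) (k p : Nat) (h : p + 1 < k) :
    pvBest l k (p + 1) = pvBest l k p := by
  unfold pvBest
  rw [Nat.sub_eq_zero_of_le (by omega), Nat.sub_eq_zero_of_le (by omega)]

lemma pvBest_zero_of_lt (l : List Char) (k p : Nat) (h : p < k) : pvBest l k p = 0 := by
  unfold pvBest
  rw [Nat.sub_eq_zero_of_le (by omega)]
  simp

lemma pvBest_succ_ge (l : List Char) (k p : Nat) (hk : k ≤ p + 1) :
    pvBest l k (p + 1) = max (pvBest l k p) ((pvW l k (p + 1 - k)) : Int) := by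
  unfold pvBest
  rw [show p + 1 + 1 - k = (p + 1 - k) + 1 by omega, List.range_succ, List.map_append,
    List.foldl_append]
  simp

lemma pvDedupCard (xs : List Char) : (PySem.List.dedup xs).length = xs.toFinset.card := by
  have hn : (PySem.List.dedup xs).Nodup := PySem.List.nodup_dedup xs
  have hf : (PySem.List.dedup xs).toFinset = xs.toFinset := by ext c; simp
  rw [← List.toFinset_card_of_nodup hn, hf]

lemma pvInv (l : List Char) (hl : l ≠ []) (p : Nat) (hp : p ≤ l.length) :
    (∀ c : Char, (pvState l p).1.getD c 0
        = ((pvWindow l (PySem.List.dedup l).length p).count c : Int))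
    ∧ (pvState l p).2.1 = ((pvWindow l (PySem.List.dedup l).length p).toFinset.card : Int)
    ∧ (pvState l p).2.2 = pvBest l (PySem.List.dedup l).length p := by
  set k := (PySem.List.dedup l).length with hkdef
  have hk1 : 1 ≤ k := by
    rw [hkdef, pvDedupCard]
    have : l.toFinset.Nonempty := by
      rcases List.exists_mem_of_ne_nil l hl with ⟨x, hx⟩
      exact ⟨x, by simpa using hx⟩
    exact Finset.card_pos.mpr this
  have hkle : k ≤ l.length := by rw [hkdef, pvDedupCard]; exact List.toFinset_card_le l
  induction p with
  | zero =>
    refine ⟨?_, ?_, ?_⟩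
    · intro c
      simp [pvState, pvWindow, PySem.Dict.getD_empty]
    · simp [pvState, pvWindow]
    · simp [pvState, pvBest_zero_of_lt l k 0 hk1]
  | succ p IH =>
    obtain ⟨hfreq, hdist, hbest⟩ := IH (by omega)
    have hpn : p < l.length := by omega
    rw [pvState_succ l p hpn, ← hkdef]
    set S := pvState l p with hSdef
    set ch := l[p] with hchdef
    by_cases hpk : p < k
    · -- growing phase: no removal
      have hwin : pvWindow l k p = l.take p := pvWin_lt l k p (by omega)
      have hwin' : pvWindow l k (p + 1) = l.take p ++ [ch] := by
        rw [pvWin_lt l k (p+1) (by omega), List.take_add_one, List.getElem?_eq_getElem hpn]; rfl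
      simp only [pvBStep]
      rw [if_neg (show ¬((p:Int) ≥ (k:Int)) by omega)]
      have hf' := pvCount_insert S.1 (l.take p) ch (fun c => by rw [hfreq c, hwin])
      have hD' : (if (S.1.getD ch 0 == 0) = true then S.2.1 + 1 else S.2.1)
          = (((l.take p ++ [ch]).toFinset.card : Nat) : Int) := by
        rw [pvCard_append, hfreq ch, hdist, hwin]
        by_cases hc0 : (l.take p).count ch = 0 <;> simp [hc0]
      refine ⟨?_, ?_, ?_⟩
      · intro c
        simp only []
        rw [hwin', hf' c]
      · simp only []
        rw [hwin', hD']
      · simp only [hD', hbest]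
        by_cases hpk1 : p + 1 < k
        · rw [if_neg ?_, pvBest_succ_lt l k p hpk1]
          rintro ⟨hj, -⟩
          omega
        · have hpk1' : p + 1 = k := by omega
          have hpos : (0:Int) < ((l.take p ++ [ch]).toFinset.card : Int) := by
            have : ch ∈ (l.take p ++ [ch]).toFinset := by simp
            have := Finset.card_pos.mpr ⟨ch, this⟩
            exact_mod_cast this
          rw [pvBest_zero_of_lt l k p hpk]
          rw [if_pos ⟨by omega, by omega⟩]
          rw [pvBest_succ_ge l k p (by omega), pvBest_zero_of_lt l k p hpk]
          have hW : pvW l k (p + 1 - k) = (l.take p ++ [ch]).toFinset.card := by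
            unfold pvW
            rw [show p + 1 - k = 0 by omega, List.drop_zero, show l.take k = l.take (p+1) by rw [hpk1'],
              List.take_add_one, List.getElem?_eq_getElem hpn]
            rfl
          rw [hW]
          omega
    · -- sliding phase: removal of the outgoing character
      have hpk' : k ≤ p := by omega
      simp only [pvBStep]
      rw [if_pos (show ((p:Int) ≥ (k:Int)) by omega)]
      have hout : (PySem.List.pyGet? l ((p:Int) - (k:Int))).getD ' ' = l[p - k]'(by omega) := by
        rw [show (p:Int) - (k:Int) = ((p - k : Nat) : Int) by omega, PySem.List.pyGet?_natCast,
          List.getElem?_eq_getElem (by omega)]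
        rfl
      set rest := (l.drop (p - k + 1)).take (k - 1) with hrest
      have hmid : pvWindow l k p = l[p - k]'(by omega) :: rest := pvWin_cons l k p hk1 hpk' hpn
      have hwin' : pvWindow l k (p + 1) = rest ++ [ch] := pvWin_snoc l k p hk1 hpk' hpn
      have hf1 := pvCount_insert S.1 (pvWindow l k p) ch hfreq
      have hc2 : (S.1.insert ch (S.1.getD ch 0 + 1)).getD (l[p - k]'(by omega)) 0
          = (((l[p - k]'(by omega)) :: (rest ++ [ch])).count (l[p - k]'(by omega)) : Int) := by
        rw [hf1, hmid]
        rfl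
      have hD1 : (if (S.1.getD ch 0 == 0) = true then S.2.1 + 1 else S.2.1)
          = (((pvWindow l k p ++ [ch]).toFinset.card : Nat) : Int) := by
        rw [pvCard_append, hfreq ch, hdist]
        by_cases hc0 : (pvWindow l k p).count ch = 0 <;> simp [hc0]
      have hD2 : (if ((S.1.insert ch (S.1.getD ch 0 + 1)).getD
              ((PySem.List.pyGet? l ((p:Int) - (k:Int))).getD ' ') 0 == 1) = true
            then (if (S.1.getD ch 0 == 0) = true then S.2.1 + 1 else S.2.1) - 1
            else (if (S.1.getD ch 0 == 0) = true then S.2.1 + 1 else S.2.1))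
          = (((rest ++ [ch]).toFinset.card : Nat) : Int) := by
        rw [hout, hc2, hD1, hmid]
        rw [pvCard_cons (l[p - k]'(by omega)) (rest ++ [ch])]
        by_cases h1 : ((((l[p - k]'(by omega)) :: (rest ++ [ch])).count (l[p - k]'(by omega)) : Int)) = 1
        · rw [if_pos (by exact_mod_cast beq_iff_eq.mpr h1), if_pos h1]
          rw [List.cons_append]
        · rw [if_neg (by simpa using h1), if_neg h1]
          rw [List.cons_append]
      refine ⟨?_, ?_, ?_⟩
      · intro c
        simp only []
        rw [hwin', hout, PySem.Dict.getD_insert]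
        by_cases hco : c = l[p - k]'(by omega)
        · rw [if_pos hco, hc2, hco]
          push_cast [List.count_cons_self]
          ring
        · rw [if_neg hco, hf1 c, hmid, List.cons_append,
            List.count_cons_of_ne (by exact fun h => hco h.symm)]
      · simp only []
        rw [hwin', hD2]
      · simp only [hD2, hbest]
        rw [pvBest_succ_ge l k p (by omega)]
        have hW : (pvW l k (p + 1 - k) : Int) = (((rest ++ [ch]).toFinset.card : Nat) : Int) := by
          unfold pvW
          rw [← hwin', pvWin_ge l k (p + 1) (by omega)]
        rw [hW, max_def]
        split_ifs with h1 h2 h3 <;> omega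

lemma pvB_eval (st : String) (hl : st.toList ≠ []) :
    LongSubstr_alt st
      = pvBest st.toList (PySem.List.dedup st.toList).length st.toList.length := by
  have hk : ((PySem.Set.ofList st.toList).length : Int)
      = ((PySem.List.dedup st.toList).length : Int) := by
    simp [PySem.List.dedup_eq_ofList]
  unfold LongSubstr_alt
  simp only [hk]
  rw [if_neg (by simpa using hl)]
  have htake : (PySem.List.enumerate st.toList 0).take st.toList.length
      = PySem.List.enumerate st.toList 0 := by
    rw [List.take_of_length_le (by rw [PySem.List.length_enumerate])]
  have := (pvInv st.toList hl st.toList.length le_rfl).2.2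
  rw [pvState, htake] at this
  exact this

lemma pvW_pos (l : List Char) (k i : Nat) (hk : 1 ≤ k) (hik : i + k ≤ l.length) :
    1 ≤ pvW l k i := by
  unfold pvW
  refine Finset.card_pos.mpr ?_
  have hlen : ((l.drop i).take k).length = k := by
    rw [List.length_take, List.length_drop]; omega
  have hne : (l.drop i).take k ≠ [] := by
    intro h; rw [h] at hlen; simp at hlen; omega
  rcases List.exists_mem_of_ne_nil _ hne with ⟨x, hx⟩
  exact ⟨x, by simpa using hx⟩

lemma pvA_eval (st : String) (hl : st.toList ≠ []) :
    LongSubstr st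
      = (PySem.List.max?
          ((List.range (st.toList.length - (PySem.List.dedup st.toList).length)).map
            (fun i => (pvW st.toList (PySem.List.dedup st.toList).length i : Int)))
          (fun y => y)).getD 0 := by
  set l := st.toList with hldef
  have hset : l.foldl (fun s c => PySem.Set.add s c) PySem.Set.empty = PySem.Set.ofList l := rfl
  have hk : (PySem.Set.ofList l).length = (PySem.List.dedup l).length := by
    simp [PySem.List.dedup_eq_ofList]
  set k := (PySem.List.dedup l).length with hkdef
  have hkle : k ≤ l.length := by
    rw [hkdef, pvDedupCard]; exact List.toFinset_card_le l
  unfold LongSubstr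
  rw [← hldef]
  simp only [hset, hk]
  rw [if_neg (by simpa using hl)]
  congr 1
  rw [PySem.List.foldl_append_singleton_eq_map]
  rw [PySem.List.pyRange_one]
  simp only [sub_zero, List.map_map]
  have hcast : ((l.length : Int) - (k : Int)).toNat = l.length - k := by omega
  rw [hcast]
  congr 1
  apply List.map_congr_left
  intro i _
  simp only [Function.comp_apply, zero_add]
  rw [show PySem.Set.update PySem.Set.empty (PySem.List.slice l (some (i:Int)) (some ((i:Int) + (k:Int)))) = PySem.Set.ofList (PySem.List.slice l (some (i:Int)) (some ((i:Int) + (k:Int)))) from rfl]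
  rw [PySem.List.slice_natCast_add]
  rw [show (PySem.Set.ofList ((l.drop i).take k)).length = (PySem.List.dedup ((l.drop i).take k)).length by simp [PySem.List.dedup_eq_ofList]]
  rw [pvDedupCard]
  rfl

lemma pvA_char (st : String) (hl : st.toList ≠ []) (hnd : ¬ st.toList.Nodup) :
    (∃ i < st.toList.length - (PySem.List.dedup st.toList).length,
        LongSubstr st = (pvW st.toList (PySem.List.dedup st.toList).length i : Int))
    ∧ (∀ i < st.toList.length - (PySem.List.dedup st.toList).length,
        (pvW st.toList (PySem.List.dedup st.toList).length i : Int) ≤ LongSubstr st) := by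
  set l := st.toList with hldef
  set k := (PySem.List.dedup l).length with hkdef
  set m := l.length - k with hmdef
  have hm1 : 1 ≤ m := by
    have : l.toFinset.card < l.length := by
      rcases lt_or_eq_of_le (List.toFinset_card_le l) with h1 | h1
      · exact h1
      · exfalso
        apply hnd
        have h2 : l.dedup.length = l.length := by rw [← List.card_toFinset]; exact h1
        have := (List.dedup_sublist l).eq_of_length h2
        rw [← this]; exact List.nodup_dedup l
    rw [hmdef, hkdef, pvDedupCard]; omega
  set lst := (List.range m).map (fun i => (pvW l k i : Int)) with hlst
  have hne : lst ≠ [] := by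
    rw [hlst]
    intro h
    have := congrArg List.length h
    simp at this
    omega
  obtain ⟨v, hv⟩ : ∃ v, PySem.List.max? lst (fun y => y) = some v := by
    cases h : PySem.List.max? lst (fun y => y) with
    | none => exact absurd ((PySem.List.max?_eq_none_iff lst (fun y => y)).mp h) hne
    | some v => exact ⟨v, rfl⟩
  have hAv : LongSubstr st = v := by rw [pvA_eval st hl, ← hlst, hv]; rfl
  constructor
  · have hvmem := PySem.List.max?_mem hv
    rw [hlst] at hvmem
    rcases List.mem_map.mp hvmem with ⟨i, hi, hfi⟩
    exact ⟨i, List.mem_range.mp hi, by rw [hAv, ← hfi]⟩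
  · intro i him
    have : (pvW l k i : Int) ∈ lst := by
      rw [hlst]
      exact List.mem_map.mpr ⟨i, List.mem_range.mpr him, rfl⟩
    have := PySem.List.max?_isMax hv _ this
    rw [hAv]
    exact this

lemma pvB_char (st : String) (hl : st.toList ≠ []) :
    (∃ i ≤ st.toList.length - (PySem.List.dedup st.toList).length,
        LongSubstr_alt st = (pvW st.toList (PySem.List.dedup st.toList).length i : Int))
    ∧ (∀ i ≤ st.toList.length - (PySem.List.dedup st.toList).length,
        (pvW st.toList (PySem.List.dedup st.toList).length i : Int) ≤ LongSubstr_alt st) := by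
  set l := st.toList with hldef
  set k := (PySem.List.dedup l).length with hkdef
  set m := l.length - k with hmdef
  have hk1 : 1 ≤ k := by
    rw [hkdef, pvDedupCard]
    rcases List.exists_mem_of_ne_nil l hl with ⟨x, hx⟩
    exact Finset.card_pos.mpr ⟨x, by simpa using hx⟩
  have hkle : k ≤ l.length := by rw [hkdef, pvDedupCard]; exact List.toFinset_card_le l
  have hB : LongSubstr_alt st
      = ((List.range (m + 1)).map (fun i => (pvW l k i : Int))).foldl max 0 := by
    rw [pvB_eval st hl]
    unfold pvBest
    rw [show l.length + 1 - k = m + 1 by omega]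
  have hub : ∀ i ≤ m, (pvW l k i : Int) ≤ LongSubstr_alt st := by
    intro i him
    rw [hB]
    exact (PySem.List.le_foldl_max _ 0).2 _
      (List.mem_map.mpr ⟨i, List.mem_range.mpr (by omega), rfl⟩)
  refine ⟨?_, hub⟩
  rcases PySem.List.foldl_max_mem ((List.range (m + 1)).map (fun i => (pvW l k i : Int))) 0 with h | h
  · exfalso
    have h0 := hub 0 (by omega)
    have hpos := pvW_pos l k 0 hk1 (by omega)
    rw [hB] at *
    omega
  · rw [← hB] at h
    rcases List.mem_map.mp h with ⟨i, hi, hfi⟩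
    exact ⟨i, Nat.lt_succ_iff.mp (List.mem_range.mp hi), by rw [← hfi]⟩

-- ===== VERDICT (by name: the statements are the Claim_ definitions above) =====
theorem LongSubstr_spec : Claim_unchanged_LongSubstr := by
  intro st _ hpre
  unfold Spec_LongSubstr
  intro hnD
  by_cases hnil : st.toList = []
  · simp [LongSubstr, LongSubstr_alt, hnil]
  · have hnd : ¬ st.toList.Nodup := by
      rcases hpre with h | h
      · exact absurd h hnil
      · exact h
    obtain ⟨i0, hi0, hge⟩ : ∃ i < st.toList.length - (PySem.List.dedup st.toList).length,
        pvW st.toList (PySem.List.dedup st.toList).length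
            (st.toList.length - (PySem.List.dedup st.toList).length)
          ≤ pvW st.toList (PySem.List.dedup st.toList).length i := by
      unfold D_LongSubstr at hnD
      push Not at hnD
      exact hnD hnil hnd
    obtain ⟨⟨ia, hia, hA⟩, hAub⟩ := pvA_char st hnil hnd
    obtain ⟨⟨ib, hib, hB⟩, hBub⟩ := pvB_char st hnil
    apply le_antisymm
    · rw [hA]; exact hBub ia (by omega)
    · rcases lt_or_eq_of_le hib with hlt | heq
      · rw [hB]; exact hAub ib (by omega)
      · rw [hB, heq]
        calc (pvW st.toList (PySem.List.dedup st.toList).length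
                (st.toList.length - (PySem.List.dedup st.toList).length) : Int)
            ≤ (pvW st.toList (PySem.List.dedup st.toList).length i0 : Int) := by exact_mod_cast hge
          _ ≤ LongSubstr st := hAub i0 hi0

theorem LongSubstr_changed : Claim_changed_LongSubstr := by
  unfold Claim_changed_LongSubstr; decide

theorem LongSubstr_tight : Claim_exact_LongSubstr := by
  intro st _ hpre hD
  obtain ⟨hnil, hnd, hall⟩ := hD
  obtain ⟨⟨ia, hia, hA⟩, hAub⟩ := pvA_char st hnil hnd
  obtain ⟨⟨ib, hib, hB⟩, hBub⟩ := pvB_char st hnil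
  have hlt : LongSubstr st < LongSubstr_alt st := by
    calc LongSubstr st
        = (pvW st.toList (PySem.List.dedup st.toList).length ia : Int) := hA
      _ < (pvW st.toList (PySem.List.dedup st.toList).length
            (st.toList.length - (PySem.List.dedup st.toList).length) : Int) := by
          exact_mod_cast hall ia hia
      _ ≤ LongSubstr_alt st := hBub _ le_rfl
  omega
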